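-- pv_equiv track=rewrite | github.com/dafdaf1234444/swarm | tools/f_ctl1_threshold_sweep.py | _episode_starts
-- ===== SOURCE A (Python) =====
-- def _episode_starts(levels: list[int]) -> list[int]:
--     starts: list[int] = []
--     prev = 0
--     for i, lv in enumerate(levels):
--         if lv > 0 and prev == 0:
--             starts.append(i)
--         prev = lv
--     return starts
-- ===== SOURCE B (Python) =====
-- def _episode_starts(levels: list[int]) -> list[int]:
--     # Segment the list into maximal runs of equal sign (-1/0/+1); a positive run
--     # is an episode start iff the run before it (or the virtual run before the
--     # list) has sign 0.  Jump run-by-run instead of stepping element-by-element.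
--     starts: list[int] = []
--     n = len(levels)
--     i = 0
--     prev_key = 0
--     while i < n:
--         key = (levels[i] > 0) - (levels[i] < 0)
--         if key == 1 and prev_key == 0:
--             starts.append(i)
--         j = i + 1
--         while j < n and ((levels[j] > 0) - (levels[j] < 0)) == key:
--             j += 1
--         prev_key = key
--         i = j
--     return starts
-- ===== Notes on version B (the rewrite author's own statement) =====
-- stated objective: alternative
-- what changed: Replaces A's element-wise scan carrying a prev value by a groupby-style segmentation into maximal runs of equal sign, jumping run-by-run and emitting a run's first index when a positive run follows a zero run.
import Mathlib
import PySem

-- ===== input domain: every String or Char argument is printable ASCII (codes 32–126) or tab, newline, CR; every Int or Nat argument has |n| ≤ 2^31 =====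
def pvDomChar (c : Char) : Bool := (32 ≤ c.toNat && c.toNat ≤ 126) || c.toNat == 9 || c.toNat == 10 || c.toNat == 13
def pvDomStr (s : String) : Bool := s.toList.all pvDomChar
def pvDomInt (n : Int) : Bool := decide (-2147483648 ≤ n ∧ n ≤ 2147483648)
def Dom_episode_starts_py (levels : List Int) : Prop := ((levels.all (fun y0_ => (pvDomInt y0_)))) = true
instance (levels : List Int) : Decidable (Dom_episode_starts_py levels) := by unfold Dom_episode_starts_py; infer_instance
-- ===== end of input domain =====

-- B replaces A's element-wise prev-carrying scan by a groupby-style segmentation into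
-- maximal runs of equal sign, emitting a positive run's first index when it follows a
-- zero run (alternative decomposition; same O(n) cost).

-- ===== PORT A =====
-- loop over enumerate(levels) carrying (starts, prev)
def episode_starts_py (levels : List Int) : List Int :=
  ((PySem.List.enumerate levels 0).foldl
    (fun st p => if p.2 > 0 ∧ st.2 = 0 then (st.1 ++ [p.1], p.2) else (st.1, p.2))
    (([] : List Int), (0 : Int))).1

-- ===== PORT B =====
-- sign key (levels[i] > 0) - (levels[i] < 0)
def pvSign (x : Int) : Int := (if x > 0 then 1 else 0) - (if x < 0 then 1 else 0)

-- inner while loop: consume the rest of the current run; returns (remaining list, run-rest length)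
def altSkip (key : Int) : List Int → List Int × Int
  | [] => ([], 0)
  | lv :: rest =>
      if pvSign lv = key then
        let p := altSkip key rest
        (p.1, p.2 + 1)
      else (lv :: rest, 0)

theorem altSkip_length_le (key : Int) : ∀ xs : List Int, (altSkip key xs).1.length ≤ xs.length := by
  intro xs
  induction xs with
  | nil => simp [altSkip]
  | cons lv rest ih =>
      simp only [altSkip]
      split
      · exact Nat.le_succ_of_le ih
      · exact Nat.le_refl _

-- outer while loop: one step per run, carrying the previous run's key
def altGo (pk i : Int) : List Int → List Int
  | [] => []
  | lv :: rest =>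
      let key := pvSign lv
      let p := altSkip key rest
      (if key = 1 ∧ pk = 0 then [i] else []) ++ altGo key (i + 1 + p.2) p.1
termination_by xs => xs.length
decreasing_by
  exact Nat.lt_succ_of_le (altSkip_length_le _ _)

def episode_starts_py_alt (levels : List Int) : List Int := altGo 0 0 levels

-- ===== PRECONDITION & SPEC =====
def Spec_episode_starts_py (levels : List Int) (out : List Int) : Prop := out = episode_starts_py_alt levels
instance (levels : List Int) (out : List Int) : Decidable (Spec_episode_starts_py levels out) := by unfold Spec_episode_starts_py; infer_instance

-- ===== CLAIM (what is proved, stated in full; the proofs are below) =====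
def Claim_equal_episode_starts_py : Prop := ∀ (levels : List Int), Dom_episode_starts_py levels → Spec_episode_starts_py levels (episode_starts_py levels)

-- ===== LEMMAS AND PROOFS =====
-- unfolding lemma for the well-founded altGo
theorem altGo_cons (pk i lv : Int) (rest : List Int) :
    altGo pk i (lv :: rest)
    = (if pvSign lv = 1 ∧ pk = 0 then [i] else [])
      ++ altGo (pvSign lv) (i + 1 + (altSkip (pvSign lv) rest).2) (altSkip (pvSign lv) rest).1 := by
  rw [altGo]

-- skipping within a run does not change altGo's result
theorem altGo_skip (key i : Int) (xs : List Int) :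
    altGo key (i + (altSkip key xs).2) (altSkip key xs).1 = altGo key i xs := by
  cases xs with
  | nil => simp [altSkip]
  | cons lv rest =>
      by_cases h : pvSign lv = key
      · have e : altSkip key (lv :: rest) = ((altSkip key rest).1, (altSkip key rest).2 + 1) := by
          simp [altSkip, h]
        rw [e, altGo_cons, h]
        have hfalse : ¬ (key = 1 ∧ key = 0) := by rintro ⟨h1, h0⟩; omega
        rw [if_neg hfalse, List.nil_append]
        have harith : i + ((altSkip key rest).2 + 1) = i + 1 + (altSkip key rest).2 := by ring
        rw [harith]
      · simp [altSkip, h]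

theorem sign_one_iff (x : Int) : pvSign x = 1 ↔ x > 0 := by
  unfold pvSign; split_ifs <;> omega

theorem sign_zero_iff (x : Int) : pvSign x = 0 ↔ x = 0 := by
  unfold pvSign; split_ifs <;> omega

theorem episode_starts_main (levels : List Int) :
    ∀ (prev i : Int) (starts : List Int),
    ((PySem.List.enumerate levels i).foldl
      (fun st p => if p.2 > 0 ∧ st.2 = 0 then (st.1 ++ [p.1], p.2) else (st.1, p.2))
      (starts, prev)).1
    = starts ++ altGo (pvSign prev) i levels := by
  induction levels with
  | nil => intro prev i starts; simp [PySem.List.enumerate_nil, altGo]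
  | cons lv rest ih =>
      intro prev i starts
      simp only [PySem.List.enumerate_cons, List.foldl_cons]
      have hcond : (lv > 0 ∧ prev = 0) ↔ (pvSign lv = 1 ∧ pvSign prev = 0) := by
        rw [sign_one_iff, sign_zero_iff]
      rw [altGo_cons, altGo_skip (pvSign lv) (i + 1) rest]
      by_cases h : lv > 0 ∧ prev = 0
      · rw [if_pos h, if_pos (hcond.mp h), ih lv (i + 1) (starts ++ [i]), List.append_assoc]
      · rw [if_neg h, if_neg (fun hc => h (hcond.mpr hc)), ih lv (i + 1) starts]
        simp

-- ===== VERDICT (by name: the statement is the Claim_ definition above) =====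
theorem episode_starts_py_spec : Claim_equal_episode_starts_py := by
  intro levels _
  show _ = _
  simp [episode_starts_py, episode_starts_py_alt, episode_starts_main, pvSign]
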